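-- pv_equiv track=rewrite | github.com/ToppiOfficial/KitsuneSourceTools | io_scene_valvesource/kitsuneui/mesh.py | extract_shape_name
-- ===== SOURCE A (Python) =====
-- def extract_shape_name(source_name, active_name):
--     min_len = min(len(source_name), len(active_name))
--
--     for i in range(min_len):
--         if source_name[i] != active_name[i]:
--             suffix = source_name[i:]
--             return suffix if suffix else source_name
--
--     if len(source_name) > len(active_name):
--         return source_name[min_len:]
--
--     return source_name
-- ===== SOURCE B (Python) =====
-- def extract_shape_name(source_name, active_name):
--     # Binary search for the common-prefix length (prefix equality is monotone),
--     # then one branch and one slice.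
--     lo, hi = 0, min(len(source_name), len(active_name))
--     while lo < hi:
--         mid = (lo + hi + 1) // 2
--         if source_name[:mid] == active_name[:mid]:
--             lo = mid
--         else:
--             hi = mid - 1
--     return source_name if lo == len(source_name) else source_name[lo:]
-- ===== Notes on version B (the rewrite author's own statement) =====
-- stated objective: alternative
-- what changed: Replaces A's per-character linear scan that decides at the first mismatch with a binary search for the common-prefix length (using monotonicity of prefix equality), followed by one branch and one slice.
import Mathlib
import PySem

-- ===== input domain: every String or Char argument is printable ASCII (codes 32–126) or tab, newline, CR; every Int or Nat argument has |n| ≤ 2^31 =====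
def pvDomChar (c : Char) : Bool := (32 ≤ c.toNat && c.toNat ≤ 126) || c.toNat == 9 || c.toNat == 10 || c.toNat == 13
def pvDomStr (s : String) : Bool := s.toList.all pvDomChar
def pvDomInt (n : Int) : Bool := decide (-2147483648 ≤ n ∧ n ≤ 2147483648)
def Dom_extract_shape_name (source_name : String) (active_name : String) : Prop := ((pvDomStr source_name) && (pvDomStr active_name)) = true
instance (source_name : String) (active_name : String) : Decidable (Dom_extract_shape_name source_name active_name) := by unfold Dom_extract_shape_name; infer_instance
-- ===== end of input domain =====

-- B finds the common-prefix length by BINARY SEARCH over prefix equality (monotone),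
-- then does a single branch + slice, instead of A's linear scan that decides at the
-- first mismatch with two post-loop branches (objective: alternative).

-- ===== PORT A =====
-- the for-loop over range(min_len); `orig` is the parameter source_name (returned as-is)
def pvAGo (s a : List Char) (orig : String) (i : Nat) : String :=
  if i < min s.length a.length then
    if s.getD i ' ' ≠ a.getD i ' ' then
      let suffix := s.drop i
      if suffix ≠ [] then String.ofList suffix else orig
    else pvAGo s a orig (i + 1)
  else if a.length < s.length then String.ofList (s.drop (min s.length a.length))
  else orig
termination_by min s.length a.length - i

def extract_shape_name (source_name : String) (active_name : String) : String :=
  pvAGo source_name.toList active_name.toList source_name 0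

-- ===== PORT B =====
-- Source B's while-loop: binary search on [lo, hi]; s[:mid] == a[:mid] is List.take mid
-- (exact for mid ≥ 0, which holds since lo, hi are Python non-negative ints here)
def pvBSearch (s a : List Char) (lo hi : Nat) : Nat :=
  if lo < hi then
    let mid := (lo + hi + 1) / 2
    if s.take mid = a.take mid then pvBSearch s a mid hi
    else pvBSearch s a lo (mid - 1)
  else lo
termination_by hi - lo
decreasing_by all_goals omega

def extract_shape_name_alt (source_name : String) (active_name : String) : String :=
  let s := source_name.toList
  let lo := pvBSearch s active_name.toList 0 (min s.length active_name.toList.length)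
  if lo = s.length then source_name else String.ofList (s.drop lo)

-- ===== PRECONDITION & SPEC =====
def Spec_extract_shape_name (source_name : String) (active_name : String) (out : String) : Prop := out = extract_shape_name_alt source_name active_name
instance (source_name : String) (active_name : String) (out : String) : Decidable (Spec_extract_shape_name source_name active_name out) := by unfold Spec_extract_shape_name; infer_instance

-- ===== CLAIM (what is proved, stated in full; the proofs are below) =====
def Claim_equal_extract_shape_name : Prop := ∀ (source_name : String) (active_name : String), Dom_extract_shape_name source_name active_name → Spec_extract_shape_name source_name active_name (extract_shape_name source_name active_name)

-- ===== LEMMAS AND PROOFS =====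

-- common-prefix length: the canonical value both ports compute
def pvCpl : List Char → List Char → Nat
  | x :: xs, y :: ys => if x = y then pvCpl xs ys + 1 else 0
  | _, _ => 0

theorem pvCpl_le_left : ∀ (s a : List Char), pvCpl s a ≤ s.length := by
  intro s
  induction s with
  | nil => intro a; cases a <;> simp [pvCpl]
  | cons x xs ih =>
    intro a
    cases a with
    | nil => simp [pvCpl]
    | cons y ys =>
      by_cases h : x = y <;> simp [pvCpl, h]
      exact ih ys

theorem pvCpl_le_right : ∀ (s a : List Char), pvCpl s a ≤ a.length := by
  intro s
  induction s with
  | nil => intro a; cases a <;> simp [pvCpl]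
  | cons x xs ih =>
    intro a
    cases a with
    | nil => simp [pvCpl]
    | cons y ys =>
      by_cases h : x = y <;> simp [pvCpl, h]
      exact ih ys

theorem pvCpl_getD_eq : ∀ (s a : List Char) (j : Nat), j < pvCpl s a →
    s.getD j ' ' = a.getD j ' ' := by
  intro s
  induction s with
  | nil => intro a j hj; cases a <;> simp [pvCpl] at hj
  | cons x xs ih =>
    intro a j hj
    cases a with
    | nil => simp [pvCpl] at hj
    | cons y ys =>
      by_cases h : x = y
      · cases j with
        | zero => simpa using h
        | succ j =>
          simp only [pvCpl, if_pos h] at hj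
          simpa using ih ys j (by omega)
      · simp [pvCpl, h] at hj

theorem pvCpl_getD_ne : ∀ (s a : List Char), pvCpl s a < s.length → pvCpl s a < a.length →
    s.getD (pvCpl s a) ' ' ≠ a.getD (pvCpl s a) ' ' := by
  intro s
  induction s with
  | nil => intro a h1 _; simp at h1
  | cons x xs ih =>
    intro a h1 h2
    cases a with
    | nil => simp at h2
    | cons y ys =>
      by_cases h : x = y
      · simp only [pvCpl, if_pos h, List.length_cons, List.getD_cons_succ] at h1 h2 ⊢
        exact ih ys (by omega) (by omega)
      · simp [pvCpl, h]

-- prefix-equality is characterised by pvCpl (for m within both lengths)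
theorem pv_take_eq_iff : ∀ (s a : List Char) (m : Nat), m ≤ s.length → m ≤ a.length →
    (s.take m = a.take m ↔ m ≤ pvCpl s a) := by
  intro s
  induction s with
  | nil =>
    intro a m hm _
    have : m = 0 := by simpa using hm
    subst this; simp
  | cons x xs ih =>
    intro a m hms hma
    cases a with
    | nil =>
      have : m = 0 := by simpa using hma
      subst this; simp
    | cons y ys =>
      cases m with
      | zero => simp
      | succ m =>
        by_cases h : x = y
        · subst h
          simp only [List.take_succ_cons, List.cons.injEq, true_and]
          rw [show pvCpl (x :: xs) (x :: ys) = pvCpl xs ys + 1 from by simp [pvCpl]]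
          rw [ih ys m (by simpa using hms) (by simpa using hma)]
          omega
        · simp [pvCpl, h]

theorem pvBSearch_eq (s a : List Char) : ∀ (k lo hi : Nat), hi - lo ≤ k →
    lo ≤ pvCpl s a → pvCpl s a ≤ hi → hi ≤ min s.length a.length →
    pvBSearch s a lo hi = pvCpl s a := by
  intro k
  induction k with
  | zero =>
    intro lo hi hk h1 h2 _
    rw [pvBSearch, if_neg (by omega)]
    omega
  | succ k ih =>
    intro lo hi hk h1 h2 h3
    rw [pvBSearch]
    by_cases hlt : lo < hi
    · rw [if_pos hlt]
      have hmid1 : lo < (lo + hi + 1) / 2 := by omega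
      have hmid2 : (lo + hi + 1) / 2 ≤ hi := by omega
      have hiff := pv_take_eq_iff s a ((lo + hi + 1) / 2) (by omega) (by omega)
      by_cases heq : s.take ((lo + hi + 1) / 2) = a.take ((lo + hi + 1) / 2)
      · rw [if_pos heq]
        exact ih _ _ (by omega) (hiff.mp heq) h2 h3
      · rw [if_neg heq]
        have : ¬ ((lo + hi + 1) / 2 ≤ pvCpl s a) := fun h => heq (hiff.mpr h)
        exact ih _ _ (by omega) h1 (by omega) (by omega)
    · rw [if_neg hlt]; omega

theorem pvAGo_eq (s a : List Char) (orig : String) :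
    ∀ (k i : Nat), min s.length a.length - i ≤ k → i ≤ pvCpl s a →
      pvAGo s a orig i =
        (if pvCpl s a = s.length then orig else String.ofList (s.drop (pvCpl s a))) := by
  intro k
  induction k with
  | zero =>
    intro i hk hi
    have hmin : min s.length a.length ≤ i := by omega
    have hps : pvCpl s a ≤ s.length := pvCpl_le_left s a
    have hpa : pvCpl s a ≤ a.length := pvCpl_le_right s a
    have hip : i = pvCpl s a := by omega
    rw [pvAGo]
    rw [if_neg (by omega)]
    by_cases hlen : a.length < s.length
    · rw [if_pos hlen, if_neg (by omega)]
      have : min s.length a.length = pvCpl s a := by omega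
      rw [this]
    · rw [if_neg hlen, if_pos (by omega)]
  | succ k ih =>
    intro i hk hi
    have hps : pvCpl s a ≤ s.length := pvCpl_le_left s a
    have hpa : pvCpl s a ≤ a.length := pvCpl_le_right s a
    rw [pvAGo]
    by_cases hlt : i < min s.length a.length
    · rw [if_pos hlt]
      by_cases hip : i = pvCpl s a
      · have hne : s.getD i ' ' ≠ a.getD i ' ' := by
          subst hip; exact pvCpl_getD_ne s a (by omega) (by omega)
        rw [if_pos hne]
        have hdrop : s.drop i ≠ [] := by
          simp only [ne_eq, List.drop_eq_nil_iff]
          omega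
        simp only [if_pos hdrop]
        rw [if_neg (by omega), hip]
      · have hilt : i < pvCpl s a := by omega
        have heq : s.getD i ' ' = a.getD i ' ' := pvCpl_getD_eq s a i hilt
        rw [if_neg (by simpa using heq)]
        exact ih (i + 1) (by omega) (by omega)
    · rw [if_neg hlt]
      have hip : i = pvCpl s a := by omega
      by_cases hlen : a.length < s.length
      · rw [if_pos hlen, if_neg (by omega)]
        have : min s.length a.length = pvCpl s a := by omega
        rw [this]
      · rw [if_neg hlen, if_pos (by omega)]

-- ===== VERDICT (by name: the statement is the Claim_ definition above) =====
theorem extract_shape_name_spec : Claim_equal_extract_shape_name := by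
  unfold Claim_equal_extract_shape_name
  intro s a _
  unfold Spec_extract_shape_name extract_shape_name extract_shape_name_alt
  rw [pvAGo_eq s.toList a.toList s (min s.toList.length a.toList.length) 0
    (by omega) (Nat.zero_le _)]
  have hb := pvBSearch_eq s.toList a.toList (min s.toList.length a.toList.length) 0
    (min s.toList.length a.toList.length) (by omega) (Nat.zero_le _)
    (by have := pvCpl_le_left s.toList a.toList; have := pvCpl_le_right s.toList a.toList; omega)
    (le_refl _)
  simp only [hb]
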